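-- pv_equiv track=rewrite | github.com/John75SunCity/ssh-git-github.com-odoo-odoo.git-18.0 | development-tools/smart_field_gap_analysis.py | suggest_field_type
-- ===== SOURCE A (Python) =====
-- def suggest_field_type(field_name):
--     """Suggest appropriate field type based on naming patterns"""
--
--     if field_name.endswith("_id"):
--         return "fields.Many2one('res.partner', string='Related Record')"
--     elif field_name.endswith("_ids"):
--         return "fields.One2many('related.model', 'inverse_field', string='Related Records')"
--     elif "date" in field_name or "time" in field_name:
--         return "fields.Datetime(string='Date Time')"
--     elif "amount" in field_name or "price" in field_name or "cost" in field_name: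
--         return "fields.Monetary(string='Amount', currency_field='currency_id')"
--     elif "email" in field_name:
--         return "fields.Char(string='Email Address')"
--     elif "phone" in field_name:
--         return "fields.Char(string='Phone Number')"
--     elif "notes" in field_name or "description" in field_name:
--         return "fields.Text(string='Notes')"
--     elif any(word in field_name for word in ["required", "active", "is_", "has_"]):
--         return "fields.Boolean(string='Flag', default=False)"
--     else:
--         return "fields.Char(string='Field')"
-- ===== SOURCE B (Python) =====
-- # Single left-to-right window scan over the name with a hash lookup per window,
-- # instead of one substring search per keyword: every substring keyword is keyed
-- # in one dict by its text, valued by its priority (= position of its group in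
-- # the original cascade); the scan keeps the minimum priority seen.
--
-- _SUB = {
--     "date": 2, "time": 2,
--     "amount": 3, "price": 3, "cost": 3,
--     "email": 4,
--     "phone": 5,
--     "notes": 6, "description": 6,
--     "required": 7, "active": 7, "is_": 7, "has_": 7,
-- }
-- _LENS = (3, 4, 5, 6, 8, 11)   # the distinct keyword lengths
-- _RESULTS = [
--     "fields.Many2one('res.partner', string='Related Record')",
--     "fields.One2many('related.model', 'inverse_field', string='Related Records')",
--     "fields.Datetime(string='Date Time')",
--     "fields.Monetary(string='Amount', currency_field='currency_id')",
--     "fields.Char(string='Email Address')",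
--     "fields.Char(string='Phone Number')",
--     "fields.Text(string='Notes')",
--     "fields.Boolean(string='Flag', default=False)",
--     "fields.Char(string='Field')",
-- ]
--
--
-- def suggest_field_type(field_name):
--     """Suggest appropriate field type based on naming patterns"""
--     if field_name.endswith("_id"):
--         return _RESULTS[0]
--     if field_name.endswith("_ids"):
--         return _RESULTS[1]
--     best = 8
--     for i in range(len(field_name)):
--         for L in _LENS:
--             p = _SUB.get(field_name[i:i + L])
--             if p is not None and p < best:
--                 best = p
--     return _RESULTS[best]
-- ===== Notes on version B (the rewrite author's own statement) =====
-- stated objective: alternative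
-- what changed: Replaces the per-keyword substring searches of the if/elif cascade with a single left-to-right window scan over the name: all substring keywords live in one dict keyed by text and valued by cascade priority, each window is looked up in the dict, and the minimum priority seen selects the result from a table.
import Mathlib
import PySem

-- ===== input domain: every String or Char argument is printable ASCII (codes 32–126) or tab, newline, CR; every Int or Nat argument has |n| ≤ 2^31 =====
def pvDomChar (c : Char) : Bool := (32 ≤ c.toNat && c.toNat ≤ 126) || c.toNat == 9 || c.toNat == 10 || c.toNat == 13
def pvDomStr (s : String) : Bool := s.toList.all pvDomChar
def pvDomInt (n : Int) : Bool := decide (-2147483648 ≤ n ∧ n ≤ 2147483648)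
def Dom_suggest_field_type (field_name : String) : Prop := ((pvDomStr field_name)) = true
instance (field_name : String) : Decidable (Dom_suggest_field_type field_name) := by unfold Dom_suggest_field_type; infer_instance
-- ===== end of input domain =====

-- B replaces A's one-substring-search-per-keyword cascade by a single window scan over the
-- name with a dict lookup (keyword → cascade priority) per window, keeping the minimum
-- priority seen; same results ('alternative').

-- ===== PORT A =====
def suggest_field_type (field_name : String) : String :=
  if PySem.Str.endswith field_name "_id" then
    "fields.Many2one('res.partner', string='Related Record')"
  else if PySem.Str.endswith field_name "_ids" then
    "fields.One2many('related.model', 'inverse_field', string='Related Records')"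
  else if PySem.Str.isIn "date" field_name || PySem.Str.isIn "time" field_name then
    "fields.Datetime(string='Date Time')"
  else if PySem.Str.isIn "amount" field_name || PySem.Str.isIn "price" field_name || PySem.Str.isIn "cost" field_name then
    "fields.Monetary(string='Amount', currency_field='currency_id')"
  else if PySem.Str.isIn "email" field_name then
    "fields.Char(string='Email Address')"
  else if PySem.Str.isIn "phone" field_name then
    "fields.Char(string='Phone Number')"
  else if PySem.Str.isIn "notes" field_name || PySem.Str.isIn "description" field_name then
    "fields.Text(string='Notes')"
  else if (["required", "active", "is_", "has_"].any (fun word => PySem.Str.isIn word field_name)) then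
    "fields.Boolean(string='Flag', default=False)"
  else
    "fields.Char(string='Field')"

-- ===== PORT B =====
-- Source B's _SUB: every substring keyword, keyed by text, valued by its cascade priority
def pvSub : PySem.Dict (List Char) Nat := PySem.Dict.ofList
  [("date".toList, 2), ("time".toList, 2), ("amount".toList, 3), ("price".toList, 3),
   ("cost".toList, 3), ("email".toList, 4), ("phone".toList, 5), ("notes".toList, 6),
   ("description".toList, 6), ("required".toList, 7), ("active".toList, 7),
   ("is_".toList, 7), ("has_".toList, 7)]

-- Source B's _LENS: the distinct keyword lengths
def pvLens : List Int := [3, 4, 5, 6, 8, 11]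

-- Source B's _RESULTS, indexed by priority
def pvResults : List String :=
  ["fields.Many2one('res.partner', string='Related Record')",
   "fields.One2many('related.model', 'inverse_field', string='Related Records')",
   "fields.Datetime(string='Date Time')",
   "fields.Monetary(string='Amount', currency_field='currency_id')",
   "fields.Char(string='Email Address')",
   "fields.Char(string='Phone Number')",
   "fields.Text(string='Notes')",
   "fields.Boolean(string='Flag', default=False)",
   "fields.Char(string='Field')"]

-- body of the inner loop: p = _SUB.get(field_name[i:i+L]); if p is not None and p < best: best = p
def pvStep (cs : List Char) (i : Int) (best : Nat) (L : Int) : Nat :=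
  match PySem.Dict.get? pvSub (PySem.List.slice cs (some i) (some (i + L))) with
  | some p => if p < best then p else best
  | none => best

-- the double loop: for i in range(len(field_name)): for L in _LENS: …
def pvScan (cs : List Char) : Nat :=
  (PySem.List.pyRange 0 (cs.length : Int)).foldl
    (fun best i => pvLens.foldl (pvStep cs i) best) 8

def suggest_field_type_alt (field_name : String) : String :=
  if PySem.Str.endswith field_name "_id" then pvResults.getD 0 ""
  else if PySem.Str.endswith field_name "_ids" then pvResults.getD 1 ""
  else pvResults.getD (pvScan field_name.toList) ""

-- ===== PRECONDITION & SPEC =====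
def Spec_suggest_field_type (field_name : String) (out : String) : Prop := out = suggest_field_type_alt field_name
instance (field_name : String) (out : String) : Decidable (Spec_suggest_field_type field_name out) := by unfold Spec_suggest_field_type; infer_instance

-- ===== CLAIM (what is proved, stated in full; the proofs are below) =====
def Claim_equal_suggest_field_type : Prop := ∀ (field_name : String), Dom_suggest_field_type field_name → Spec_suggest_field_type field_name (suggest_field_type field_name)

-- ===== LEMMAS AND PROOFS =====

theorem pvSub_items : pvSub.items =
  [("date".toList, 2), ("time".toList, 2), ("amount".toList, 3), ("price".toList, 3),
   ("cost".toList, 3), ("email".toList, 4), ("phone".toList, 5), ("notes".toList, 6),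
   ("description".toList, 6), ("required".toList, 7), ("active".toList, 7),
   ("is_".toList, 7), ("has_".toList, 7)] := by decide

theorem get?_pvSub (k : List Char) (p : Nat) :
    PySem.Dict.get? pvSub k = some p ↔ (k, p) ∈ pvSub.items :=
  PySem.Dict.get?_eq_some_iff_mem_items _ _ _ (PySem.Dict.nodup_keys_ofList _)

-- a window (i, L) of cs that the dict lookup maps to priority p
def pvCand (cs : List Char) (i L : Int) (p : Nat) : Prop :=
  PySem.Dict.get? pvSub (PySem.List.slice cs (some i) (some (i + L))) = some p

-- some keyword of priority p occurs in cs
def pvHit (cs : List Char) (p : Nat) : Prop :=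
  ∃ kw, (kw, p) ∈ pvSub.items ∧ PySem.Chars.isIn kw cs = true

theorem pvHit_prio {cs : List Char} {p : Nat} (h : pvHit cs p) : 2 ≤ p ∧ p ≤ 7 := by
  obtain ⟨kw, hm, -⟩ := h
  rw [pvSub_items] at hm
  simp only [List.mem_cons, List.not_mem_nil, or_false, Prod.mk.injEq] at hm
  rcases hm with ⟨-,h⟩|⟨-,h⟩|⟨-,h⟩|⟨-,h⟩|⟨-,h⟩|⟨-,h⟩|⟨-,h⟩|⟨-,h⟩|⟨-,h⟩|⟨-,h⟩|⟨-,h⟩|⟨-,h⟩|⟨-,h⟩ <;> omega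


-- keyword shape facts, by enumeration of the table
theorem pvKw_shape {kw : List Char} {p : Nat} (h : (kw, p) ∈ pvSub.items) :
    kw ≠ [] ∧ ((kw.length : Int)) ∈ pvLens := by
  rw [pvSub_items] at h
  simp only [List.mem_cons, List.not_mem_nil, or_false, Prod.mk.injEq] at h
  rcases h with ⟨h,-⟩|⟨h,-⟩|⟨h,-⟩|⟨h,-⟩|⟨h,-⟩|⟨h,-⟩|⟨h,-⟩|⟨h,-⟩|⟨h,-⟩|⟨h,-⟩|⟨h,-⟩|⟨h,-⟩|⟨h,-⟩ <;> subst h <;> exact ⟨by decide, by decide⟩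


-- step only decreases
theorem pvStep_le (cs : List Char) (i : Int) (b : Nat) (L : Int) : pvStep cs i b L ≤ b := by
  unfold pvStep; cases PySem.Dict.get? pvSub (PySem.List.slice cs (some i) (some (i + L))) with
  | none => exact le_refl b
  | some p => dsimp only; split <;> omega

theorem pvInner_le (cs : List Char) (i : Int) : ∀ (ls : List Int) (b : Nat),
    ls.foldl (pvStep cs i) b ≤ b := by
  intro ls; induction ls with
  | nil => intro b; exact le_refl b
  | cons L t ih => intro b; exact le_trans (ih _) (pvStep_le cs i b L)

theorem pvInner_src (cs : List Char) (i : Int) : ∀ (ls : List Int) (b : Nat),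
    ls.foldl (pvStep cs i) b = b ∨ ∃ L ∈ ls, pvCand cs i L (ls.foldl (pvStep cs i) b) := by
  intro ls
  induction ls with
  | nil => intro b; exact Or.inl rfl
  | cons L t ih =>
    intro b
    simp only [List.foldl_cons]
    rcases ih (pvStep cs i b L) with h | ⟨L', hL', hc⟩
    · rw [h]
      unfold pvStep pvCand
      cases hg : PySem.Dict.get? pvSub (PySem.List.slice cs (some i) (some (i + L))) with
      | none => exact Or.inl rfl
      | some p =>
        dsimp only
        split
        · exact Or.inr ⟨L, List.mem_cons_self, hg⟩
        · exact Or.inl rfl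
    · exact Or.inr ⟨L', List.mem_cons_of_mem _ hL', hc⟩


theorem pvInner_min (cs : List Char) (i : Int) : ∀ (ls : List Int) (b : Nat) (L : Int) (p : Nat),
    L ∈ ls → pvCand cs i L p → ls.foldl (pvStep cs i) b ≤ p := by
  intro ls
  induction ls with
  | nil => intro b L p h; exact absurd h (List.not_mem_nil)
  | cons L' t ih =>
    intro b L p hm hc
    simp only [List.foldl_cons]
    rcases List.mem_cons.mp hm with he | ht
    · subst he
      have hstep : pvStep cs i b L ≤ p := by
        unfold pvStep; rw [hc]; dsimp only; split <;> omega
      exact le_trans (pvInner_le cs i t _) hstep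
    · exact ih _ L p ht hc


-- same three facts for the outer loop
def pvIdx (cs : List Char) (p : Nat) : Prop :=
  ∃ i ∈ PySem.List.pyRange 0 (cs.length : Int), ∃ L ∈ pvLens, pvCand cs i L p

theorem pvOuter_le (cs : List Char) : ∀ (is_ : List Int) (b : Nat),
    is_.foldl (fun best i => pvLens.foldl (pvStep cs i) best) b ≤ b := by
  intro is_; induction is_ with
  | nil => intro b; exact le_refl b
  | cons i t ih => intro b; exact le_trans (ih _) (pvInner_le cs i pvLens b)

theorem pvOuter_src (cs : List Char) : ∀ (is_ : List Int) (b : Nat),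
    is_.foldl (fun best i => pvLens.foldl (pvStep cs i) best) b = b ∨
      ∃ i ∈ is_, ∃ L ∈ pvLens,
        pvCand cs i L (is_.foldl (fun best i => pvLens.foldl (pvStep cs i) best) b) := by
  intro is_
  induction is_ with
  | nil => intro b; exact Or.inl rfl
  | cons i t ih =>
    intro b
    simp only [List.foldl_cons]
    rcases ih (pvLens.foldl (pvStep cs i) b) with h | ⟨i', hi', L, hL, hc⟩
    · rw [h]
      rcases pvInner_src cs i pvLens b with h2 | ⟨L, hL, hc⟩
      · exact Or.inl h2
      · exact Or.inr ⟨i, List.mem_cons_self, L, hL, hc⟩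
    · exact Or.inr ⟨i', List.mem_cons_of_mem _ hi', L, hL, hc⟩

theorem pvScan_src (cs : List Char) : pvScan cs = 8 ∨ pvIdx cs (pvScan cs) :=
  pvOuter_src cs (PySem.List.pyRange 0 (cs.length : Int)) 8


theorem pvOuter_min (cs : List Char) : ∀ (is_ : List Int) (b : Nat) (i L : Int) (p : Nat),
    i ∈ is_ → L ∈ pvLens → pvCand cs i L p →
    is_.foldl (fun best i => pvLens.foldl (pvStep cs i) best) b ≤ p := by
  intro is_
  induction is_ with
  | nil => intro b i L p h; exact absurd h (List.not_mem_nil)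
  | cons i' t ih =>
    intro b i L p hi hL hc
    simp only [List.foldl_cons]
    rcases List.mem_cons.mp hi with he | ht
    · subst he
      exact le_trans (pvOuter_le cs t _) (pvInner_min cs i pvLens b L p hL hc)
    · exact ih _ i L p ht hL hc

theorem pvScan_min (cs : List Char) (p : Nat) (h : pvIdx cs p) : pvScan cs ≤ p := by
  obtain ⟨i, hi, L, hL, hc⟩ := h
  exact pvOuter_min cs _ 8 i L p hi hL hc


theorem pvIdx_iff_hit (cs : List Char) (p : Nat) : pvIdx cs p ↔ pvHit cs p := by
  constructor
  · rintro ⟨i, hi, L, hL, hc⟩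
    obtain ⟨hi0, -⟩ := PySem.List.mem_pyRange_one.mp hi
    have hL0 : (0:Int) ≤ i + L := by
      have : (3:Int) ≤ L := by
        simp only [pvLens, List.mem_cons, List.not_mem_nil, or_false] at hL
        rcases hL with h|h|h|h|h|h <;> omega
      omega
    have hm := (get?_pvSub _ p).mp hc
    refine ⟨_, hm, ?_⟩
    rw [PySem.Chars.isIn_iff_infix, PySem.List.slice_toNat cs hi0 hL0]
    exact (List.take_prefix _ _).isInfix.trans (List.drop_suffix _ _).isInfix
  · rintro ⟨kw, hm, hin⟩
    obtain ⟨hne, hlen⟩ := pvKw_shape hm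
    obtain ⟨j, hpre⟩ := (PySem.Chars.exists_prefix_drop_iff_isIn kw cs).mpr hin
    have hjlt : j < cs.length := by
      have h1 : kw.length ≤ (cs.drop j).length := hpre.length_le
      have h2 : 0 < kw.length := List.length_pos_iff.mpr hne
      simp only [List.length_drop] at h1
      omega
    refine ⟨(j : Int), PySem.List.mem_pyRange_one.mpr ⟨by positivity, by exact_mod_cast hjlt⟩,
      (kw.length : Int), hlen, ?_⟩
    unfold pvCand
    rw [PySem.List.slice_natCast_add cs j kw.length]
    have hkw : List.take kw.length (List.drop j cs) = kw :=
      (List.prefix_iff_eq_take.mp hpre).symm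
    rw [hkw]
    exact (get?_pvSub _ p).mpr hm


-- the cascade value of A's substring branches
def pvChain (cs : List Char) : Nat :=
  if PySem.Chars.isIn "date".toList cs || PySem.Chars.isIn "time".toList cs then 2
  else if PySem.Chars.isIn "amount".toList cs || PySem.Chars.isIn "price".toList cs || PySem.Chars.isIn "cost".toList cs then 3
  else if PySem.Chars.isIn "email".toList cs then 4
  else if PySem.Chars.isIn "phone".toList cs then 5
  else if PySem.Chars.isIn "notes".toList cs || PySem.Chars.isIn "description".toList cs then 6
  else if PySem.Chars.isIn "required".toList cs || (PySem.Chars.isIn "active".toList cs || (PySem.Chars.isIn "is_".toList cs || PySem.Chars.isIn "has_".toList cs)) then 7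
  else 8

theorem pvHit_iff (cs : List Char) (p : Nat) : pvHit cs p ↔
    (p = 2 ∧ (PySem.Chars.isIn "date".toList cs = true ∨ PySem.Chars.isIn "time".toList cs = true)) ∨
    (p = 3 ∧ (PySem.Chars.isIn "amount".toList cs = true ∨ PySem.Chars.isIn "price".toList cs = true ∨ PySem.Chars.isIn "cost".toList cs = true)) ∨
    (p = 4 ∧ PySem.Chars.isIn "email".toList cs = true) ∨
    (p = 5 ∧ PySem.Chars.isIn "phone".toList cs = true) ∨
    (p = 6 ∧ (PySem.Chars.isIn "notes".toList cs = true ∨ PySem.Chars.isIn "description".toList cs = true)) ∨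
    (p = 7 ∧ (PySem.Chars.isIn "required".toList cs = true ∨ PySem.Chars.isIn "active".toList cs = true ∨ PySem.Chars.isIn "is_".toList cs = true ∨ PySem.Chars.isIn "has_".toList cs = true)) := by
  unfold pvHit
  rw [pvSub_items]
  constructor
  · rintro ⟨kw, hm, hin⟩
    simp only [List.mem_cons, List.not_mem_nil, or_false, Prod.mk.injEq] at hm
    rcases hm with ⟨h1,h2⟩|⟨h1,h2⟩|⟨h1,h2⟩|⟨h1,h2⟩|⟨h1,h2⟩|⟨h1,h2⟩|⟨h1,h2⟩|⟨h1,h2⟩|⟨h1,h2⟩|⟨h1,h2⟩|⟨h1,h2⟩|⟨h1,h2⟩|⟨h1,h2⟩ <;> subst h1 <;> subst h2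
    · exact Or.inl ⟨rfl, Or.inl hin⟩
    · exact Or.inl ⟨rfl, Or.inr hin⟩
    · exact Or.inr (Or.inl ⟨rfl, Or.inl hin⟩)
    · exact Or.inr (Or.inl ⟨rfl, Or.inr (Or.inl hin)⟩)
    · exact Or.inr (Or.inl ⟨rfl, Or.inr (Or.inr hin)⟩)
    · exact Or.inr (Or.inr (Or.inl ⟨rfl, hin⟩))
    · exact Or.inr (Or.inr (Or.inr (Or.inl ⟨rfl, hin⟩)))
    · exact Or.inr (Or.inr (Or.inr (Or.inr (Or.inl ⟨rfl, Or.inl hin⟩))))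
    · exact Or.inr (Or.inr (Or.inr (Or.inr (Or.inl ⟨rfl, Or.inr hin⟩))))
    · exact Or.inr (Or.inr (Or.inr (Or.inr (Or.inr ⟨rfl, Or.inl hin⟩))))
    · exact Or.inr (Or.inr (Or.inr (Or.inr (Or.inr ⟨rfl, Or.inr (Or.inl hin)⟩))))
    · exact Or.inr (Or.inr (Or.inr (Or.inr (Or.inr ⟨rfl, Or.inr (Or.inr (Or.inl hin))⟩))))
    · exact Or.inr (Or.inr (Or.inr (Or.inr (Or.inr ⟨rfl, Or.inr (Or.inr (Or.inr hin))⟩))))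
  · rintro (⟨hp,h|h⟩|⟨hp,h|h|h⟩|⟨hp,h⟩|⟨hp,h⟩|⟨hp,h|h⟩|⟨hp,h|h|h|h⟩) <;> subst hp
    · exact ⟨"date".toList, by decide, h⟩
    · exact ⟨"time".toList, by decide, h⟩
    · exact ⟨"amount".toList, by decide, h⟩
    · exact ⟨"price".toList, by decide, h⟩
    · exact ⟨"cost".toList, by decide, h⟩
    · exact ⟨"email".toList, by decide, h⟩
    · exact ⟨"phone".toList, by decide, h⟩
    · exact ⟨"notes".toList, by decide, h⟩
    · exact ⟨"description".toList, by decide, h⟩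
    · exact ⟨"required".toList, by decide, h⟩
    · exact ⟨"active".toList, by decide, h⟩
    · exact ⟨"is_".toList, by decide, h⟩
    · exact ⟨"has_".toList, by decide, h⟩


theorem pvScan_eq (cs : List Char) : pvScan cs = pvChain cs := by
  have hle8 : pvScan cs ≤ 8 := pvOuter_le cs _ 8
  have hmin : ∀ p, pvHit cs p → pvScan cs ≤ p :=
    fun p hp => pvScan_min cs p ((pvIdx_iff_hit cs p).mpr hp)
  have hsrc : pvScan cs = 8 ∨ pvHit cs (pvScan cs) := by
    rcases pvScan_src cs with h | h
    · exact Or.inl h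
    · exact Or.inr ((pvIdx_iff_hit cs _).mp h)
  unfold pvChain
  split_ifs with h2 h3 h4 h5 h6 h7
  · rw [Bool.or_eq_true] at h2
    have hu := hmin 2 ((pvHit_iff cs 2).mpr (Or.inl ⟨rfl, h2⟩))
    rcases hsrc with hr | hr
    · omega
    · have hb := pvHit_prio hr
      rw [pvHit_iff] at hr
      rcases hr with ⟨e,hx⟩|⟨e,hx⟩|⟨e,hx⟩|⟨e,hx⟩|⟨e,hx⟩|⟨e,hx⟩ <;> omega
  · simp only [Bool.or_eq_true, not_or, Bool.not_eq_true] at h2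
    simp only [Bool.or_eq_true] at h3
    have hu := hmin 3 ((pvHit_iff cs 3).mpr (Or.inr (Or.inl ⟨rfl, by tauto⟩)))
    rcases hsrc with hr | hr
    · omega
    · have hb := pvHit_prio hr
      rw [pvHit_iff] at hr
      rcases hr with ⟨e,hx⟩|⟨e,hx⟩|⟨e,hx⟩|⟨e,hx⟩|⟨e,hx⟩|⟨e,hx⟩ <;>
        first | omega | (exfalso; rcases hx with h|h <;> simp_all)
  · simp only [Bool.or_eq_true, not_or, Bool.not_eq_true] at h2 h3
    have hu := hmin 4 ((pvHit_iff cs 4).mpr (Or.inr (Or.inr (Or.inl ⟨rfl, h4⟩))))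
    rcases hsrc with hr | hr
    · omega
    · have hb := pvHit_prio hr
      rw [pvHit_iff] at hr
      rcases hr with ⟨e,hx⟩|⟨e,hx⟩|⟨e,hx⟩|⟨e,hx⟩|⟨e,hx⟩|⟨e,hx⟩ <;>
        first | omega | (exfalso; rcases hx with h|h|h <;> simp_all) | (exfalso; rcases hx with h|h <;> simp_all)
  · simp only [Bool.or_eq_true, not_or, Bool.not_eq_true] at h2 h3
    have hu := hmin 5 ((pvHit_iff cs 5).mpr (Or.inr (Or.inr (Or.inr (Or.inl ⟨rfl, h5⟩)))))
    rcases hsrc with hr | hr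
    · omega
    · have hb := pvHit_prio hr
      rw [pvHit_iff] at hr
      rcases hr with ⟨e,hx⟩|⟨e,hx⟩|⟨e,hx⟩|⟨e,hx⟩|⟨e,hx⟩|⟨e,hx⟩ <;>
        first | omega | (exfalso; simp_all)
  · simp only [Bool.or_eq_true, not_or, Bool.not_eq_true] at h2 h3
    rw [Bool.or_eq_true] at h6
    have hu := hmin 6 ((pvHit_iff cs 6).mpr (Or.inr (Or.inr (Or.inr (Or.inr (Or.inl ⟨rfl, h6⟩))))))
    rcases hsrc with hr | hr
    · omega
    · have hb := pvHit_prio hr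
      rw [pvHit_iff] at hr
      rcases hr with ⟨e,hx⟩|⟨e,hx⟩|⟨e,hx⟩|⟨e,hx⟩|⟨e,hx⟩|⟨e,hx⟩ <;>
        first | omega | (exfalso; simp_all)
  · simp only [Bool.or_eq_true, not_or, Bool.not_eq_true] at h2 h3 h6
    simp only [Bool.or_eq_true] at h7
    have hu := hmin 7 ((pvHit_iff cs 7).mpr (Or.inr (Or.inr (Or.inr (Or.inr (Or.inr ⟨rfl, by tauto⟩))))))
    rcases hsrc with hr | hr
    · omega
    · have hb := pvHit_prio hr
      rw [pvHit_iff] at hr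
      rcases hr with ⟨e,hx⟩|⟨e,hx⟩|⟨e,hx⟩|⟨e,hx⟩|⟨e,hx⟩|⟨e,hx⟩ <;>
        first | omega | (exfalso; simp_all)
  · simp only [Bool.or_eq_true, not_or, Bool.not_eq_true] at h2 h3 h6 h7
    rcases hsrc with hr | hr
    · exact hr
    · exfalso
      have hb := pvHit_prio hr
      rw [pvHit_iff] at hr
      rcases hr with ⟨e,hx⟩|⟨e,hx⟩|⟨e,hx⟩|⟨e,hx⟩|⟨e,hx⟩|⟨e,hx⟩ <;>
        simp_all


-- ===== VERDICT (by name: the statement is the Claim_ definition above) =====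
theorem suggest_field_type_spec : Claim_equal_suggest_field_type := by
  intro n _
  show suggest_field_type n = suggest_field_type_alt n
  unfold suggest_field_type suggest_field_type_alt
  rw [pvScan_eq]
  unfold pvChain
  simp only [PySem.Str.isIn_eq, List.any_cons, List.any_nil, Bool.or_false]
  split_ifs <;> simp [pvResults]
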